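-- pv_equiv track=rewrite | github.com/0BigMax0/CHI_algorithm | CHI_algorithm.py | findColumnCost
-- ===== SOURCE A (Python) =====
-- def findColumnCost(cost_matrix,visit_point,unvisited_tour):
--     "find the set of vertex c that closet to the edge"
--     combine_point = []
--     min_column_cost = []
--     if len(unvisited_tour) == 1:
--         combine_point = []
--         min_column_cost = []
--     else:
--         for i in range(len(cost_matrix[0])):
--             temp = []
--             for j in range(len(unvisited_tour)):
--                 if unvisited_tour[j] != visit_point:
--                     temp.append(cost_matrix[j][i])
--                 else:
--                     temp.append(999999)
--             min_column_cost.append(min(temp))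
--             combine_point.append(unvisited_tour[temp.index(min(temp))])
--     return min_column_cost,combine_point
-- ===== SOURCE B (Python) =====
-- def findColumnCost(cost_matrix, visit_point, unvisited_tour):
--     "find the set of vertex c that closet to the edge"
--     if len(unvisited_tour) == 1:
--         return [], []
--     ncols = len(cost_matrix[0])
--     if ncols == 0:
--         return [], []
--     p0 = unvisited_tour[0]
--     row0 = [999999] * ncols if p0 == visit_point else cost_matrix[0][:ncols]
--     best = [(c, p0) for c in row0]
--     for j in range(1, len(unvisited_tour)):
--         p = unvisited_tour[j]
--         vals = [999999] * ncols if p == visit_point else cost_matrix[j][:ncols]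
--         best = [(v, p) if v < bc else (bc, bp) for (bc, bp), v in zip(best, vals)]
--     return [c for c, _ in best], [p for _, p in best]
-- ===== Notes on version B (the rewrite author's own statement) =====
-- stated objective: alternative
-- what changed: A builds, for every column, a temp list and then scans it twice more with min() and list.index(); B makes a single row-major sweep over the matrix, maintaining one running (best cost, best point) pair per column and never materialising the per-column temp lists, with an early return when row 0 has no columns.
import Mathlib
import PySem

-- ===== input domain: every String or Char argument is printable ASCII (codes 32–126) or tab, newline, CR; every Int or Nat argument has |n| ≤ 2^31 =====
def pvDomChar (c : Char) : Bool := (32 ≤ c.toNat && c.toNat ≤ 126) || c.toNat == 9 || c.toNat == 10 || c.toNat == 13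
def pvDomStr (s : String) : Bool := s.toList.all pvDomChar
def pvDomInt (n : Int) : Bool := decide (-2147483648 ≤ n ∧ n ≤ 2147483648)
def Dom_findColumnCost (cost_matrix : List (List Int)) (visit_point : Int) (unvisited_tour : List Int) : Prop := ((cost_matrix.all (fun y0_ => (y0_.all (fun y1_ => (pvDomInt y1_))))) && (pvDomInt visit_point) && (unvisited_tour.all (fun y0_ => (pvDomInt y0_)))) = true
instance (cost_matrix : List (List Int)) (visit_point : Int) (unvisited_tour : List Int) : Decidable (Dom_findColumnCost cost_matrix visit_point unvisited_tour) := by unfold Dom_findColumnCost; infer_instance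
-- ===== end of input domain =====

-- B replaces A's per-column build-temp-list/min()/index() passes by one row-major sweep that
-- maintains a running (best cost, best point) pair per column; return values agree on Pre_.

-- ===== PORT A =====
def findColumnCost (cost_matrix : List (List Int)) (visit_point : Int) (unvisited_tour : List Int) : List Int × List Int :=
  if unvisited_tour.length == 1 then ([], [])
  else
    (PySem.List.pyRange 0 ((PySem.List.pyGetD cost_matrix 0 []).length : Int) 1).foldl
      (fun acc i =>
        let temp : List Int :=
          (PySem.List.pyRange 0 (unvisited_tour.length : Int) 1).foldl
            (fun t j =>
              if PySem.List.pyGetD unvisited_tour j 0 ≠ visit_point then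
                t ++ [PySem.List.pyGetD (PySem.List.pyGetD cost_matrix j []) i 0]
              else
                t ++ [(999999 : Int)])
            []
        let m : Int := (PySem.List.min? temp (fun x => x)).getD 0
        (acc.1 ++ [m],
         acc.2 ++ [PySem.List.pyGetD unvisited_tour (((PySem.List.index? temp m).getD 0 : Nat) : Int) 0]))
      ([], [])

-- ===== PORT B =====
def findColumnCost_alt (cost_matrix : List (List Int)) (visit_point : Int) (unvisited_tour : List Int) : List Int × List Int :=
  if unvisited_tour.length == 1 then ([], [])
  else
    let ncols := (PySem.List.pyGetD cost_matrix 0 []).length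
    if ncols == 0 then ([], [])
    else
      let p0 := PySem.List.pyGetD unvisited_tour 0 0
      let row0 := if p0 == visit_point then List.replicate ncols (999999 : Int)
                  else PySem.List.slice (PySem.List.pyGetD cost_matrix 0 []) none (some (ncols : Int))
      let best0 := row0.map (fun c => (c, p0))
      let best := (PySem.List.pyRange 1 (unvisited_tour.length : Int) 1).foldl
        (fun best j =>
          let p := PySem.List.pyGetD unvisited_tour j 0
          let vals := if p == visit_point then List.replicate ncols (999999 : Int)
                      else PySem.List.slice (PySem.List.pyGetD cost_matrix j []) none (some (ncols : Int))
          (best.zip vals).map (fun bv => if bv.2 < bv.1.1 then (bv.2, p) else bv.1))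
        best0
      (best.map Prod.fst, best.map Prod.snd)

-- ===== PRECONDITION & SPEC =====
-- Pre_ excludes exactly the inputs on which A raises (empty cost_matrix when the tour has ≠ 1
-- points; and, when row 0 is nonempty: an empty tour, or an unmasked tour position whose matrix
-- row is missing or shorter than row 0); on every input A returns a value, Pre_ holds.
def Pre_findColumnCost (cost_matrix : List (List Int)) (visit_point : Int) (unvisited_tour : List Int) : Prop :=
  unvisited_tour.length = 1 ∨
  (cost_matrix ≠ [] ∧
    ((cost_matrix.getD 0 []).length = 0 ∨
      (unvisited_tour ≠ [] ∧
        ∀ j : Nat, j < unvisited_tour.length →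
          (unvisited_tour.getD j 0 = visit_point ∨
            (j < cost_matrix.length ∧
              (cost_matrix.getD 0 []).length ≤ (cost_matrix.getD j []).length)))))
instance (cost_matrix : List (List Int)) (visit_point : Int) (unvisited_tour : List Int) : Decidable (Pre_findColumnCost cost_matrix visit_point unvisited_tour) := by unfold Pre_findColumnCost; infer_instance

def pvWitness_findColumnCost : List (List Int) × Int × List Int := ([[3, 1], [2, 5], [7, 7]], 20, [10, 20, 30])

def Spec_findColumnCost (cost_matrix : List (List Int)) (visit_point : Int) (unvisited_tour : List Int) (out : List Int × List Int) : Prop := out = findColumnCost_alt cost_matrix visit_point unvisited_tour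
instance (cost_matrix : List (List Int)) (visit_point : Int) (unvisited_tour : List Int) (out : List Int × List Int) : Decidable (Spec_findColumnCost cost_matrix visit_point unvisited_tour out) := by unfold Spec_findColumnCost; infer_instance

-- ===== CLAIM (what is proved, stated in full; the proofs are below) =====
def Claim_equal_findColumnCost : Prop := ∀ (cost_matrix : List (List Int)) (visit_point : Int) (unvisited_tour : List Int), Dom_findColumnCost cost_matrix visit_point unvisited_tour → Pre_findColumnCost cost_matrix visit_point unvisited_tour → Spec_findColumnCost cost_matrix visit_point unvisited_tour (findColumnCost cost_matrix visit_point unvisited_tour)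

-- ===== LEMMAS AND PROOFS =====

/-- The masked cost of tour position `j` in column `i` (mirrors both programs' defaults). -/
def pvW (cm : List (List Int)) (vp : Int) (ut : List Int) (i j : Nat) : Int :=
  if ut.getD j 0 ≠ vp then (cm.getD j []).getD i 0 else 999999

/-- First minimum together with its index over `w 0, …, w k`. -/
def pvBIdx (w : Nat → Int) : Nat → Int × Nat
  | 0 => (w 0, 0)
  | k + 1 => if w (k + 1) < (pvBIdx w k).1 then (w (k + 1), k + 1) else pvBIdx w k

/-- The common value of both programs (main branch). -/
def pvOut (cm : List (List Int)) (vp : Int) (ut : List Int) : List Int × List Int :=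
  ((List.range (cm.getD 0 []).length).map (fun i => (pvBIdx (pvW cm vp ut i) (ut.length - 1)).1),
   (List.range (cm.getD 0 []).length).map (fun i => ut.getD (pvBIdx (pvW cm vp ut i) (ut.length - 1)).2 0))

-- pieces of A's loop body (zeta-reduced)
def pvTempA (cm : List (List Int)) (vp : Int) (ut : List Int) (i : Int) : List Int :=
  (PySem.List.pyRange 0 (ut.length : Int) 1).foldl
    (fun t j =>
      if PySem.List.pyGetD ut j 0 ≠ vp then
        t ++ [PySem.List.pyGetD (PySem.List.pyGetD cm j []) i 0]
      else
        t ++ [(999999 : Int)])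
    []

def pvMA (cm : List (List Int)) (vp : Int) (ut : List Int) (i : Int) : Int :=
  (PySem.List.min? (pvTempA cm vp ut i) (fun x => x)).getD 0

def pvPA (cm : List (List Int)) (vp : Int) (ut : List Int) (i : Int) : Int :=
  PySem.List.pyGetD ut (((PySem.List.index? (pvTempA cm vp ut i) (pvMA cm vp ut i)).getD 0 : Nat) : Int) 0

-- pieces of B's loop (zeta-reduced)
def pvStepB (cm : List (List Int)) (vp : Int) (ut : List Int) (best : List (Int × Int)) (j : Int) : List (Int × Int) :=
  (best.zip (if PySem.List.pyGetD ut j 0 == vp then List.replicate (PySem.List.pyGetD cm 0 []).length (999999 : Int)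
             else PySem.List.slice (PySem.List.pyGetD cm j []) none (some ((PySem.List.pyGetD cm 0 []).length : Int)))).map
    (fun bv => if bv.2 < bv.1.1 then (bv.2, PySem.List.pyGetD ut j 0) else bv.1)

def pvBest0 (cm : List (List Int)) (vp : Int) (ut : List Int) : List (Int × Int) :=
  (if PySem.List.pyGetD ut 0 0 == vp then List.replicate (PySem.List.pyGetD cm 0 []).length (999999 : Int)
   else PySem.List.slice (PySem.List.pyGetD cm 0 []) none (some ((PySem.List.pyGetD cm 0 []).length : Int))).map
    (fun c => (c, PySem.List.pyGetD ut 0 0))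

theorem pvBIdx_succ (w : Nat → Int) (k : Nat) :
    pvBIdx w (k + 1) = if w (k + 1) < (pvBIdx w k).1 then (w (k + 1), k + 1) else pvBIdx w k := rfl

theorem pvBIdx_snd_le (w : Nat → Int) (k : Nat) : (pvBIdx w k).2 ≤ k := by
  induction k with
  | zero => exact Nat.le.refl
  | succ k ih =>
    rw [pvBIdx_succ]
    split
    · simp
    · exact Nat.le_succ_of_le ih

theorem pvBIdx_fst_eq (w : Nat → Int) (k : Nat) : w (pvBIdx w k).2 = (pvBIdx w k).1 := by
  induction k with
  | zero => rfl
  | succ k ih =>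
    rw [pvBIdx_succ]
    split
    · rfl
    · exact ih

theorem pvBIdx_min (w : Nat → Int) (k : Nat) : ∀ j ≤ k, (pvBIdx w k).1 ≤ w j := by
  induction k with
  | zero =>
    intro j hj
    have hj0 : j = 0 := Nat.le_zero.mp hj
    subst hj0
    exact le_of_eq rfl
  | succ k ih =>
    intro j hj
    rw [pvBIdx_succ]
    split
    · rename_i h
      by_cases hj' : j ≤ k
      · exact le_trans (le_of_lt h) (ih j hj')
      · have hje : j = k + 1 := by omega
        subst hje
        exact le_refl (w (k + 1))
    · rename_i h
      by_cases hj' : j ≤ k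
      · exact ih j hj'
      · have hje : j = k + 1 := by omega
        subst hje
        exact not_lt.mp h

theorem pvBIdx_first (w : Nat → Int) (k : Nat) : ∀ j < (pvBIdx w k).2, (pvBIdx w k).1 < w j := by
  induction k with
  | zero => intro j hj; exact absurd hj (Nat.not_lt_zero j)
  | succ k ih =>
    intro j hj
    rw [pvBIdx_succ] at hj ⊢
    by_cases hlt : w (k + 1) < (pvBIdx w k).1
    · rw [if_pos hlt] at hj ⊢
      have hj' : j < k + 1 := hj
      exact lt_of_lt_of_le hlt (pvBIdx_min w k j (Nat.lt_succ_iff.mp hj'))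
    · rw [if_neg hlt] at hj ⊢
      exact ih j hj

theorem pv_min?_eq (w : Nat → Int) (k : Nat) :
    PySem.List.min? ((List.range (k + 1)).map w) (fun x => x) = some (pvBIdx w k).1 := by
  cases h : PySem.List.min? ((List.range (k + 1)).map w) (fun x => x) with
  | none =>
    rw [PySem.List.min?_eq_none_iff] at h
    simp at h
  | some m =>
    have hmem := PySem.List.min?_mem h
    have hmin := PySem.List.min?_isMin h
    obtain ⟨j, hj, rfl⟩ : ∃ j, j < k + 1 ∧ w j = m := by simpa using hmem
    have h1 : (pvBIdx w k).1 ≤ w j := pvBIdx_min w k j (by omega)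
    have h2 : w j ≤ (pvBIdx w k).1 := by
      have hbmem : (pvBIdx w k).1 ∈ (List.range (k + 1)).map w := by
        refine List.mem_map.mpr ⟨(pvBIdx w k).2, ?_, pvBIdx_fst_eq w k⟩
        simpa [List.mem_range] using Nat.lt_succ_of_le (pvBIdx_snd_le w k)
      simpa using hmin _ hbmem
    rw [le_antisymm h2 h1]

theorem pv_index?_eq (w : Nat → Int) (k : Nat) :
    PySem.List.index? ((List.range (k + 1)).map w) (pvBIdx w k).1 = some (pvBIdx w k).2 := by
  rw [PySem.List.index?_eq_some_iff]
  have hj0 : (pvBIdx w k).2 < k + 1 := Nat.lt_succ_of_le (pvBIdx_snd_le w k)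
  have hlen : ((List.range (k + 1)).map w).length = k + 1 := by simp
  have hj0t : (pvBIdx w k).2 < ((List.range (k + 1)).map w).length := by omega
  refine ⟨((List.range (k + 1)).map w).take (pvBIdx w k).2,
          ((List.range (k + 1)).map w).drop ((pvBIdx w k).2 + 1), ?_, ?_, ?_⟩
  · conv_lhs => rw [← List.take_append_drop (pvBIdx w k).2 ((List.range (k + 1)).map w)]
    rw [List.drop_eq_getElem_cons hj0t]
    have hget : ((List.range (k + 1)).map w)[(pvBIdx w k).2] = w (pvBIdx w k).2 := by
      simp
    rw [hget, pvBIdx_fst_eq w k]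
  · simp [List.length_take]
    omega
  · intro hmem
    obtain ⟨idx, hidx, hEq⟩ := List.mem_iff_getElem.mp hmem
    have hidx' : idx < (pvBIdx w k).2 := by
      simp [List.length_take, hlen] at hidx
      omega
    rw [List.getElem_take] at hEq
    have hval : ((List.range (k + 1)).map w)[idx]'(by omega) = w idx := by simp
    rw [hval] at hEq
    have := pvBIdx_first w k idx hidx'
    omega

theorem pv_foldl_pair {α : Type} (l : List α) (f g : α → Int) (xs ys : List Int) :
    l.foldl (fun acc i => (acc.1 ++ [f i], acc.2 ++ [g i])) (xs, ys) = (xs ++ l.map f, ys ++ l.map g) := by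
  induction l generalizing xs ys with
  | nil => simp
  | cons x l ih => simp [List.foldl_cons, ih]

theorem pv_temp_eq (cm : List (List Int)) (vp : Int) (ut : List Int) (i n' : Nat)
    (hn : ut.length = n' + 1) :
    pvTempA cm vp ut (i : Int) = (List.range (n' + 1)).map (pvW cm vp ut i) := by
  unfold pvTempA
  rw [hn, PySem.List.pyRange_zero_natCast]
  suffices h : ∀ (l : List Nat) (acc : List Int),
      List.foldl (fun t j =>
        if PySem.List.pyGetD ut j 0 ≠ vp then
          t ++ [PySem.List.pyGetD (PySem.List.pyGetD cm j []) (i : Int) 0]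
        else t ++ [(999999 : Int)]) acc (l.map (fun k : Nat => (k : Int)))
      = acc ++ l.map (pvW cm vp ut i) by
    rw [h (List.range (n' + 1)) [], List.nil_append]
  intro l
  induction l with
  | nil => intro acc; rw [List.map_nil, List.foldl_nil, List.map_nil, List.append_nil]
  | cons j l ih =>
    intro acc
    simp only [List.map_cons, List.foldl_cons]
    rw [PySem.List.pyGetD_natCast ut j, PySem.List.pyGetD_natCast cm j,
      PySem.List.pyGetD_natCast (cm.getD j []) i]
    by_cases hc : ut.getD j 0 ≠ vp
    · rw [if_pos hc, ih]
      have hval : pvW cm vp ut i j = (cm.getD j []).getD i 0 := by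
        simp only [pvW]
        rw [if_pos hc]
      rw [hval, List.append_assoc, List.singleton_append]
    · rw [if_neg hc, ih]
      have hval : pvW cm vp ut i j = 999999 := by
        simp only [pvW]
        rw [if_neg hc]
      rw [hval, List.append_assoc, List.singleton_append]

theorem pv_A_eq (cm : List (List Int)) (vp : Int) (ut : List Int)
    (hut : ut ≠ []) (hne1 : ut.length ≠ 1) :
    findColumnCost cm vp ut = pvOut cm vp ut := by
  have hpos : 0 < ut.length := by
    cases ut with
    | nil => exact absurd rfl hut
    | cons a l => simp
  obtain ⟨n', hn⟩ : ∃ n', ut.length = n' + 1 := ⟨ut.length - 1, by omega⟩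
  unfold findColumnCost
  rw [if_neg (by simp [hne1])]
  show (PySem.List.pyRange 0 ((PySem.List.pyGetD cm 0 []).length : Int) 1).foldl
      (fun acc i => (acc.1 ++ [pvMA cm vp ut i], acc.2 ++ [pvPA cm vp ut i])) ([], [])
    = pvOut cm vp ut
  rw [PySem.List.pyRange_zero_natCast]
  simp only [List.foldl_map]
  rw [pv_foldl_pair (List.range (PySem.List.pyGetD cm 0 []).length)
      (fun k => pvMA cm vp ut (k : Int)) (fun k => pvPA cm vp ut (k : Int)) [] []]
  simp only [List.nil_append]
  unfold pvOut
  rw [Prod.mk.injEq]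
  have hr0 : PySem.List.pyGetD cm 0 [] = cm.getD 0 [] := PySem.List.pyGetD_zero cm []
  constructor
  · rw [hr0]
    apply List.map_congr_left
    intro i _
    simp only [pvMA, pv_temp_eq cm vp ut i n' hn, pv_min?_eq, Option.getD_some, hn,
      Nat.add_sub_cancel]
  · rw [hr0]
    apply List.map_congr_left
    intro i _
    simp only [pvPA, pvMA, pv_temp_eq cm vp ut i n' hn, pv_min?_eq, Option.getD_some,
      pv_index?_eq, hn, Nat.add_sub_cancel, PySem.List.pyGetD_natCast]

/-- A also returns `([], [])` when row 0 is empty: its column loop never runs. -/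
theorem pv_A_nil_cols (cm : List (List Int)) (vp : Int) (ut : List Int)
    (hne1 : ut.length ≠ 1) (h0 : (cm.getD 0 []).length = 0) :
    findColumnCost cm vp ut = ([], []) := by
  unfold findColumnCost
  rw [if_neg (by simp [hne1])]
  rw [PySem.List.pyGetD_zero cm, h0]
  rw [show ((0 : Nat) : Int) = (0 : Int) by simp, PySem.List.pyRange_zero_natCast]
  simp

theorem pv_replicate_eq (n : Nat) (c : Int) :
    List.replicate n c = (List.range n).map (fun _ => c) := by
  simp [List.map_const']

theorem pv_getD_eq {l : List Int} {i : Nat} (h : i < l.length) (d : Int) : l.getD i d = l[i] := by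
  rw [List.getD_eq_getElem?_getD, List.getElem?_eq_getElem h]
  rfl

theorem pv_B_inv (cm : List (List Int)) (vp : Int) (ut : List Int)
    (hrow : ∀ j : Nat, j < ut.length →
      (ut.getD j 0 = vp ∨ (j < cm.length ∧ (cm.getD 0 []).length ≤ (cm.getD j []).length))) :
    ∀ k : Nat, k < ut.length →
      (PySem.List.pyRange 1 ((k : Int) + 1) 1).foldl (pvStepB cm vp ut) (pvBest0 cm vp ut)
        = (List.range (cm.getD 0 []).length).map
            (fun i => ((pvBIdx (pvW cm vp ut i) k).1, ut.getD (pvBIdx (pvW cm vp ut i) k).2 0)) := by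
  intro k
  induction k with
  | zero =>
    intro _
    rw [show ((0 : Nat) : Int) + 1 = 1 by simp]
    rw [PySem.List.pyRange_one_eq_nil (le_refl 1), List.foldl_nil]
    unfold pvBest0
    rw [PySem.List.pyGetD_zero ut, PySem.List.pyGetD_zero cm]
    by_cases hp : ut.getD 0 0 = vp
    · rw [if_pos (beq_iff_eq.mpr hp)]
      apply List.ext_getElem
      · simp
      · intro i h1 h2
        have hi : i < (cm.getD 0 []).length := by
          rw [List.length_map, List.length_replicate] at h1
          exact h1
        rw [List.getElem_map, List.getElem_replicate, List.getElem_map, List.getElem_range]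
        have hw0 : pvW cm vp ut i 0 = 999999 := by
          simp only [pvW]
          rw [if_neg (not_not_intro hp)]
        rw [show pvBIdx (pvW cm vp ut i) 0 = (pvW cm vp ut i 0, 0) from rfl, hw0]
    · rw [if_neg (by rw [beq_iff_eq]; exact hp)]
      rw [PySem.List.slice_to_natCast, List.take_length]
      apply List.ext_getElem
      · simp
      · intro i h1 h2
        have hi : i < (cm.getD 0 []).length := by
          rw [List.length_map] at h1
          exact h1
        rw [List.getElem_map, List.getElem_map, List.getElem_range]
        have hw0 : pvW cm vp ut i 0 = (cm.getD 0 []).getD i 0 := by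
          simp only [pvW]
          rw [if_pos hp]
        have hgd : (cm.getD 0 []).getD i 0 = (cm.getD 0 [])[i] := pv_getD_eq hi 0
        rw [show pvBIdx (pvW cm vp ut i) 0 = (pvW cm vp ut i 0, 0) from rfl, hw0, hgd]
  | succ k ih =>
    intro hk1
    have hk : k < ut.length := by omega
    rw [show ((k + 1 : Nat) : Int) + 1 = (((k : Nat) : Int) + 1) + 1 by push_cast; ring]
    rw [PySem.List.pyRange_one_succ_right (by omega : (1 : Int) ≤ (k : Int) + 1)]
    rw [List.foldl_append, List.foldl_cons, List.foldl_nil]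
    rw [ih hk]
    unfold pvStepB
    rw [show ((k : Int) + 1) = ((k + 1 : Nat) : Int) by push_cast; ring]
    rw [PySem.List.pyGetD_natCast ut (k + 1), PySem.List.pyGetD_natCast cm (k + 1),
      PySem.List.pyGetD_zero cm]
    by_cases hp : ut.getD (k + 1) 0 = vp
    · rw [if_pos (beq_iff_eq.mpr hp)]
      rw [pv_replicate_eq, List.zip_map', List.map_map]
      apply List.map_congr_left
      intro i _
      simp only [Function.comp]
      have hw : pvW cm vp ut i (k + 1) = 999999 := by
        simp only [pvW]
        rw [if_neg (not_not_intro hp)]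
      show (if (999999 : Int) < (pvBIdx (pvW cm vp ut i) k).1
            then ((999999 : Int), ut.getD (k + 1) 0)
            else ((pvBIdx (pvW cm vp ut i) k).1, ut.getD (pvBIdx (pvW cm vp ut i) k).2 0))
          = ((pvBIdx (pvW cm vp ut i) (k + 1)).1, ut.getD (pvBIdx (pvW cm vp ut i) (k + 1)).2 0)
      rw [pvBIdx_succ, hw]
      split <;> simp
    · rw [if_neg (by rw [beq_iff_eq]; exact hp)]
      rcases hrow (k + 1) hk1 with hm | ⟨_, hcols⟩
      · exact absurd hm hp
      have hvals : PySem.List.slice (cm.getD (k + 1) []) none (some ((cm.getD 0 []).length : Int))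
          = (List.range (cm.getD 0 []).length).map (fun i => (cm.getD (k + 1) []).getD i 0) := by
        rw [PySem.List.slice_to_natCast]
        apply List.ext_getElem
        · rw [List.length_take, List.length_map, List.length_range]
          exact Nat.min_eq_left hcols
        · intro i h1 h2
          have hi : i < (cm.getD 0 []).length := by
            rw [List.length_take] at h1
            omega
          have hi' : i < (cm.getD (k + 1) []).length := by omega
          rw [List.getElem_take, List.getElem_map, List.getElem_range]
          exact (pv_getD_eq hi' 0).symm
      rw [hvals, List.zip_map', List.map_map]
      apply List.map_congr_left
      intro i _
      simp only [Function.comp]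
      have hw : pvW cm vp ut i (k + 1) = (cm.getD (k + 1) []).getD i 0 := by
        simp only [pvW]
        rw [if_pos hp]
      show (if (cm.getD (k + 1) []).getD i 0 < (pvBIdx (pvW cm vp ut i) k).1
            then ((cm.getD (k + 1) []).getD i 0, ut.getD (k + 1) 0)
            else ((pvBIdx (pvW cm vp ut i) k).1, ut.getD (pvBIdx (pvW cm vp ut i) k).2 0))
          = ((pvBIdx (pvW cm vp ut i) (k + 1)).1, ut.getD (pvBIdx (pvW cm vp ut i) (k + 1)).2 0)
      rw [pvBIdx_succ, hw]
      split <;> simp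

theorem pv_B_eq (cm : List (List Int)) (vp : Int) (ut : List Int)
    (hut : ut ≠ []) (hne1 : ut.length ≠ 1) (h0 : (cm.getD 0 []).length ≠ 0)
    (hrow : ∀ j : Nat, j < ut.length →
      (ut.getD j 0 = vp ∨ (j < cm.length ∧ (cm.getD 0 []).length ≤ (cm.getD j []).length))) :
    findColumnCost_alt cm vp ut = pvOut cm vp ut := by
  have hpos : 0 < ut.length := by
    cases ut with
    | nil => exact absurd rfl hut
    | cons a l => simp
  obtain ⟨n', hn⟩ : ∃ n', ut.length = n' + 1 := ⟨ut.length - 1, by omega⟩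
  unfold findColumnCost_alt
  rw [if_neg (by simp [hne1])]
  rw [if_neg (by rw [PySem.List.pyGetD_zero cm]; simpa using h0)]
  show (((PySem.List.pyRange 1 (ut.length : Int) 1).foldl (pvStepB cm vp ut) (pvBest0 cm vp ut)).map Prod.fst,
        ((PySem.List.pyRange 1 (ut.length : Int) 1).foldl (pvStepB cm vp ut) (pvBest0 cm vp ut)).map Prod.snd)
      = pvOut cm vp ut
  rw [show ((ut.length : Int)) = ((n' : Nat) : Int) + 1 by rw [hn]; push_cast; ring]
  rw [pv_B_inv cm vp ut hrow n' (by omega)]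
  unfold pvOut
  rw [hn]
  simp [List.map_map]

/-- B returns `([], [])` when row 0 is empty (its zero-column guard). -/
theorem pv_B_nil_cols (cm : List (List Int)) (vp : Int) (ut : List Int)
    (hne1 : ut.length ≠ 1) (h0 : (cm.getD 0 []).length = 0) :
    findColumnCost_alt cm vp ut = ([], []) := by
  unfold findColumnCost_alt
  rw [if_neg (by simp [hne1])]
  rw [if_pos (by rw [PySem.List.pyGetD_zero cm]; simpa using h0)]

-- ===== VERDICT (by name: the statement is the Claim_ definition above) =====
theorem findColumnCost_spec : Claim_equal_findColumnCost := by
  intro cm vp ut _ hpre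
  unfold Spec_findColumnCost
  by_cases hlen : ut.length = 1
  · unfold findColumnCost findColumnCost_alt
    rw [if_pos (by simp [hlen]), if_pos (by simp [hlen])]
  · rcases hpre with h1 | ⟨_, h0 | ⟨hut, hrow⟩⟩
    · exact absurd h1 hlen
    · rw [pv_A_nil_cols cm vp ut hlen h0, pv_B_nil_cols cm vp ut hlen h0]
    · by_cases h0 : (cm.getD 0 []).length = 0
      · rw [pv_A_nil_cols cm vp ut hlen h0, pv_B_nil_cols cm vp ut hlen h0]
      · rw [pv_A_eq cm vp ut hut hlen, pv_B_eq cm vp ut hut hlen h0 hrow]
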